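-- pv_equiv track=rewrite | github.com/yigitkonur/cli-localize | xlat/format_handlers/ios_strings.py | validate_content
-- ===== SOURCE A (Python) =====
-- def validate_content(content: str) -> list[str]:
--     """Validate .strings file format."""
--     errors = []
--
--     # Check for basic structure
--     if '=' not in content:
--         errors.append("No key-value pairs found (expected format: \"key\" = \"value\";)")
--
--     # Check for mismatched quotes
--     in_string = False
--     for i, char in enumerate(content):
--         if char == '"' and (i == 0 or content[i-1] != '\\'):
--             in_string = not in_string
--
--     if in_string:
--         errors.append("Unmatched quote found")
--
--     return errors
-- ===== SOURCE B (Python) =====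
-- def validate_content(content: str) -> list[str]:
--     """Validate .strings file format."""
--     errors = []
--     if '=' not in content:
--         errors.append("No key-value pairs found (expected format: \"key\" = \"value\";)")
--     # parity of unescaped quotes = total quotes minus quotes preceded by a backslash
--     if (content.count('"') - content.count('\\"')) % 2 == 1:
--         errors.append("Unmatched quote found")
--     return errors
-- ===== Notes on version B (the rewrite author's own statement) =====
-- stated objective: idiomatic
-- what changed: Replaced the char-by-char enumerate loop that toggles an in_string boolean (with an index lookup at the previous position) by two whole-string substring counts — total quote count minus backslash-escaped quote count — deciding the unmatched-quote error by parity of that difference.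
import Mathlib
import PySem

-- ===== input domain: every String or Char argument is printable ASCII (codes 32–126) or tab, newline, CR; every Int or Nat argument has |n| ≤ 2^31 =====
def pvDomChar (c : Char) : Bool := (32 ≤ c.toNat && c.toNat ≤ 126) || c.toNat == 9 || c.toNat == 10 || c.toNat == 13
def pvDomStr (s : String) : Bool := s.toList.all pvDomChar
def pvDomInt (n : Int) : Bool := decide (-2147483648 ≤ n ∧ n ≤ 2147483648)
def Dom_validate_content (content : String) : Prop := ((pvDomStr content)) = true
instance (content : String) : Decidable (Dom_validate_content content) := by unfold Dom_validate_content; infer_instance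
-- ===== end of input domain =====

-- B replaces A's char-by-char in_string toggle with a parity check on substring
-- counts (content.count('"') - content.count('\\"')) — simpler/more idiomatic.


-- ===== PORT A =====
def validate_content (content : String) : List String :=
  let errors : List String := []
  let errors :=
    if !(PySem.Str.isIn "=" content) then
      errors ++ ["No key-value pairs found (expected format: \"key\" = \"value\";)"]
    else errors
  let cs := content.toList
  let in_string :=
    (PySem.List.enumerate cs 0).foldl
      (fun b p =>
        if p.2 == '"' && (p.1 == 0 || !(PySem.List.pyGet? cs (p.1 - 1) == some '\\')) then
          !b
        else b)
      false
  if in_string then errors ++ ["Unmatched quote found"] else errors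

-- ===== PORT B =====
def validate_content_alt (content : String) : List String :=
  let errors : List String := []
  let errors :=
    if !(PySem.Str.isIn "=" content) then
      errors ++ ["No key-value pairs found (expected format: \"key\" = \"value\";)"]
    else errors
  let unescaped : Int :=
    (PySem.Str.count content "\"" : Int) - (PySem.Str.count content "\\\"" : Int)
  if PySem.Int.mod unescaped 2 == 1 then errors ++ ["Unmatched quote found"] else errors

-- ===== PRECONDITION & SPEC =====
def Spec_validate_content (content : String) (out : List String) : Prop := out = validate_content_alt content
instance (content : String) (out : List String) : Decidable (Spec_validate_content content out) := by unfold Spec_validate_content; infer_instance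

-- ===== CLAIM (what is proved, stated in full; the proofs are below) =====
def Claim_equal_validate_content : Prop := ∀ (content : String), Dom_validate_content content → Spec_validate_content content (validate_content content)

-- ===== LEMMAS AND PROOFS =====

-- number of unescaped quotes in a suffix, given whether the previous char was '\'
def uq (b : Bool) : List Char → Nat
  | [] => 0
  | c :: t => (if c = '"' ∧ b = false then 1 else 0) + uq (c == '\\') t

-- number of escaped quotes in a suffix, given whether the previous char was '\'
def eqc (b : Bool) : List Char → Nat
  | [] => 0
  | c :: t => (if c = '"' ∧ b = true then 1 else 0) + eqc (c == '\\') t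

theorem count_eq_uq_add_eqc (cs : List Char) : ∀ b, cs.count '"' = uq b cs + eqc b cs := by
  induction cs with
  | nil => intro b; simp [uq, eqc]
  | cons c t ih =>
    intro b
    simp only [uq, eqc, List.count_cons]
    rw [ih (c == '\\')]
    by_cases hc : c = '"' <;> cases b <;> simp [hc] <;> omega

theorem eqc_indep (t : List Char) (h : t = [] ∨ ∃ d t', t = d :: t' ∧ d ≠ '"') :
    ∀ b b', eqc b t = eqc b' t := by
  intro b b'
  rcases h with h | ⟨d, t', rfl, hd⟩
  · subst h; rfl
  · simp [eqc, hd]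

theorem go_single (fuel : Nat) : ∀ (cs : List Char) (acc : Nat), cs.length ≤ fuel →
    PySem.Chars.count.go ['"'] fuel cs acc = acc + cs.count '"' := by
  induction fuel with
  | zero =>
    intro cs acc h
    have : cs = [] := List.eq_nil_of_length_eq_zero (Nat.le_zero.mp h)
    subst this; simp [PySem.Chars.count.go]
  | succ n ih =>
    intro cs acc h
    match cs with
    | [] => simp [PySem.Chars.count.go]
    | c :: t =>
      simp only [PySem.Chars.count.go]
      by_cases hc : c = '"'
      · subst hc
        simp only [List.isPrefixOf, List.isPrefixOf_nil_left, Bool.and_true, beq_self_eq_true,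
          Bool.true_and, if_pos]
        rw [show List.drop (['"'] : List Char).length ('"' :: t) = t from rfl,
          ih t (acc + 1) (by simpa using Nat.lt_succ_iff.mp (by simpa using h))]
        simp [List.count_cons]
        omega
      · have h1 : (c == '"') = false := beq_eq_false_iff_ne.mpr hc
        have h2 : ('"' == c) = false := beq_eq_false_iff_ne.mpr (fun h => hc h.symm)
        rw [if_neg (by simp [List.isPrefixOf, h2])]
        rw [ih t acc (by simpa using Nat.lt_succ_iff.mp (by simpa using h))]
        simp [List.count_cons, h1, h2]

theorem go_pair (fuel : Nat) : ∀ (cs : List Char) (acc : Nat), cs.length ≤ fuel →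
    PySem.Chars.count.go ['\\', '"'] fuel cs acc = acc + eqc false cs := by
  induction fuel with
  | zero =>
    intro cs acc h
    have : cs = [] := List.eq_nil_of_length_eq_zero (Nat.le_zero.mp h)
    subst this; simp [PySem.Chars.count.go, eqc]
  | succ n ih =>
    intro cs acc h
    match cs with
    | [] => simp [PySem.Chars.count.go, eqc]
    | c :: t =>
      simp only [PySem.Chars.count.go]
      by_cases hpre : (['\\', '"'].isPrefixOf (c :: t)) = true
      · match t, hpre with
        | [], hpre => simp [List.isPrefixOf] at hpre
        | d :: t', hpre =>
          simp only [List.isPrefixOf, Bool.and_eq_true, beq_iff_eq] at hpre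
          obtain ⟨hc, hd, -⟩ := hpre
          subst hc; subst hd
          rw [if_pos (by simp [List.isPrefixOf])]
          have hlen : t'.length ≤ n := by simp at h; omega
          rw [show ['\\', '"'].length = 2 from rfl, show List.drop 2 ('\\' :: '"' :: t') = t' from rfl,
            ih t' (acc + 1) hlen]
          simp [eqc]
          omega
      · rw [if_neg hpre]
        rw [ih t acc (by simp at h; omega)]
        have hstep : eqc false (c :: t) = eqc false t := by
          by_cases hc : c = '\\'
          · subst hc
            have ht : t = [] ∨ ∃ d t', t = d :: t' ∧ d ≠ '"' := by
              match t with
              | [] => exact Or.inl rfl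
              | d :: t' =>
                refine Or.inr ⟨d, t', rfl, ?_⟩
                intro hd
                exact hpre (by simp [List.isPrefixOf, hd])
            rw [show eqc false ('\\' :: t) = eqc ('\\' == '\\') t by simp [eqc]]
            exact (eqc_indep t ht _ _)
          · have : (c == '\\') = false := by simpa using hc
            simp [eqc, hc, this]
        omega

theorem count_pair (cs : List Char) : PySem.Chars.count cs ['\\', '"'] = eqc false cs := by
  simp [PySem.Chars.count]
  rw [go_pair cs.length cs 0 le_rfl]; omega

theorem count_quote (cs : List Char) : PySem.Chars.count cs ['"'] = cs.count '"' := by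
  simp [PySem.Chars.count]
  rw [go_single cs.length cs 0 le_rfl]; omega

-- previous-char-is-backslash flag for position k of cs
def pb (cs : List Char) (k : Nat) : Bool := decide (k ≠ 0) && (cs.getD (k - 1) ' ' == '\\')

theorem loopA (cs : List Char) : ∀ (suf : List Char) (k : Nat) (b : Bool), suf = cs.drop k →
    (PySem.List.enumerate suf (k : Int)).foldl
      (fun b p =>
        if p.2 == '"' && (p.1 == 0 || !(PySem.List.pyGet? cs (p.1 - 1) == some '\\')) then
          !b
        else b) b
    = (b ^^ decide (Odd (uq (pb cs k) suf))) := by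
  intro suf
  induction suf with
  | nil => intro k b _; simp [PySem.List.enumerate, uq]
  | cons c t ih =>
    intro k b hsuf
    have hk : k < cs.length := by
      by_contra hk
      rw [List.drop_eq_nil_of_le (Nat.le_of_not_lt hk)] at hsuf
      exact List.cons_ne_nil _ _ hsuf
    have hc? : cs[k]? = some c := by
      have h0 : (cs.drop k)[0]? = some c := by rw [← hsuf]; rfl
      rw [List.getElem?_drop] at h0; simpa using h0
    have hc : cs[k] = c := by
      have := List.getElem?_eq_getElem hk
      rw [hc?] at this; exact (Option.some_inj.mp this.symm)
    have ht : t = cs.drop (k + 1) := by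
      have := congrArg List.tail hsuf
      simpa [List.tail_drop] using this
    rw [PySem.List.enumerate_cons]
    rw [List.foldl_cons]
    rw [show ((k : Int) + 1) = ((k + 1 : Nat) : Int) by push_cast; ring]
    rw [ih (k + 1) _ ht]
    have hpb1 : pb cs (k + 1) = (c == '\\') := by
      simp [pb, ← hc, List.getD_eq_getElem?_getD, List.getElem?_eq_getElem hk]
    rw [hpb1]
    -- the toggle condition equals the uq condition
    have hcond : (c == '"' && ((k : Int) == 0 || !(PySem.List.pyGet? cs ((k : Int) - 1) == some '\\')))
        = decide (c = '"' ∧ pb cs k = false) := by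
      by_cases hk0 : k = 0
      · subst hk0
        by_cases hcq : c = '"' <;> simp [pb, hcq]
      · have hge : 1 ≤ k := Nat.one_le_iff_ne_zero.mpr hk0
        have hidx : ((k : Int) - 1) = ((k - 1 : Nat) : Int) := by push_cast [hge]; ring
        rw [hidx, PySem.List.pyGet?_natCast,
          List.getElem?_eq_getElem (by omega : k - 1 < cs.length)]
        have : ((k : Int) == 0) = false := by simpa using hk0
        rw [this]
        simp [pb, hk0, List.getD_eq_getElem?_getD,
          List.getElem?_eq_getElem (by omega : k - 1 < cs.length)]
        by_cases hcq : c = '"' <;> by_cases hbs : cs[k-1] = '\\' <;> simp [hcq, hbs]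
    rw [hcond]
    have huq : uq (pb cs k) (c :: t)
        = (if c = '"' ∧ pb cs k = false then 1 else 0) + uq (c == '\\') t := by
      simp [uq]
    by_cases hu : c = '"' ∧ pb cs k = false
    · rw [if_pos hu] at huq
      rw [if_pos (by simp [hu]), huq]
      rw [Nat.add_comm 1 (uq (c == '\\') t)]
      have hflip : decide (Odd (uq (c == '\\') t + 1)) = !decide (Odd (uq (c == '\\') t)) := by
        by_cases hodd : Odd (uq (c == '\\') t) <;> simp [Nat.odd_add_one, hodd]
      rw [hflip]
      cases b <;> simp
    · rw [if_neg hu] at huq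
      rw [if_neg (by simpa using hu), huq]
      simp

theorem parity_bridge (u e : Nat) :
    (PySem.Int.mod (((u + e : Nat) : Int) - (e : Int)) 2 == 1) = decide (Odd u) := by
  have h1 : (((u + e : Nat) : Int) - (e : Int)) = (u : Int) := by push_cast; ring
  rw [h1]
  have h2 : PySem.Int.mod (u : Int) 2 = ((u % 2 : Nat) : Int) := by
    simp [PySem.Int.mod, Int.fmod_eq_emod]
  rw [h2]
  rcases Nat.even_or_odd u with he | ho
  · have h0 : u % 2 = 0 := Nat.even_iff.mp he
    simp [h0, Nat.odd_iff]
  · have h1 : u % 2 = 1 := Nat.odd_iff.mp ho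
    simp [h1, Nat.odd_iff]

-- ===== VERDICT (by name: the statement is the Claim_ definition above) =====
theorem validate_content_spec : Claim_equal_validate_content := by
  intro content _
  unfold Spec_validate_content validate_content validate_content_alt
  have hq : PySem.Chars.count content.toList ("\"" : String).toList
      = uq false content.toList + eqc false content.toList := by
    rw [show ("\"" : String).toList = ['"'] from rfl, count_quote,
      count_eq_uq_add_eqc content.toList false]
  have hp : PySem.Chars.count content.toList ("\\\"" : String).toList
      = eqc false content.toList := by
    rw [show ("\\\"" : String).toList = ['\\', '"'] from rfl, count_pair]
  have hl := loopA content.toList content.toList 0 false (by simp)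
  rw [show pb content.toList 0 = false by simp [pb]] at hl
  simp only [Nat.cast_zero, Bool.false_xor] at hl
  refine if_congr ?_ rfl rfl
  rw [hl, PySem.Str.count_eq, PySem.Str.count_eq, hq, hp, parity_bridge]
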